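-- pv_equiv track=rewrite | github.com/tokheim/aoc | 2024/day_8.py | list_harmonic_antinodes
-- ===== SOURCE A (Python) =====
-- def list_harmonic_antinodes(antenna_pairs, tlines):
--     height = len(tlines)
--     width = len(tlines[0])
--     antinodes = set()
--     for a, b in antenna_pairs:
--         found = calc_h_antinodes(a, b, width, height)
--         antinodes = antinodes.union(found)
--         found = calc_h_antinodes(b, a, width, height)
--         antinodes = antinodes.union(found)
--     return antinodes
--
-- def calc_h_antinodes(a, b, width, height):
--     a_x, a_y = a
--     b_x, b_y = b
--     d_x = b_x - a_x
--     d_y = b_y - a_y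
--     nodes = []
--     i_x, i_y = b_x, b_y
--     while within_bounds(i_x, i_y, width, height):
--         nodes.append((i_x, i_y))
--         i_x += d_x
--         i_y += d_y
--     return nodes
--
-- def within_bounds(x, y, width, height):
--     if x < 0 or x >= width:
--         return False
--     return y >= 0 and y < height
-- ===== SOURCE B (Python) =====
-- def list_harmonic_antinodes(antenna_pairs, tlines):
--     height = len(tlines)
--     width = len(tlines[0])
--     antinodes = set()
--     for a, b in antenna_pairs:
--         antinodes.update(_ray(b[0], b[1], b[0] - a[0], b[1] - a[1], width, height))
--         antinodes.update(_ray(a[0], a[1], a[0] - b[0], a[1] - b[1], width, height))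
--     return antinodes
--
--
-- def _axis_lims(p, d, lo):
--     """Max nonnegative i keeping p + i*d in [0, lo), as a 0/1-element list (empty = unbounded)."""
--     if d > 0:
--         return [(lo - 1 - p) // d]
--     elif d < 0:
--         return [p // (-d)]
--     return []
--
--
-- def _ray(x, y, dx, dy, width, height):
--     """All points (x + i*dx, y + i*dy), i = 0..i_max, inside the grid, by closed form."""
--     if not (0 <= x < width and 0 <= y < height):
--         return []
--     lims = _axis_lims(x, dx, width) + _axis_lims(y, dy, height)
--     i_max = min(lims) if lims else 0
--     return [(x + i * dx, y + i * dy) for i in range(i_max + 1)]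
-- ===== Notes on version B (the rewrite author's own statement) =====
-- stated objective: alternative
-- what changed: Per ray, A steps cell by cell with a while-loop testing bounds at each step; B computes the maximal multiplier in closed form (one floor division per moving axis, minimum over axes) and emits the whole ray with a single range, accumulating into the set with update instead of repeated union.
import Mathlib
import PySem

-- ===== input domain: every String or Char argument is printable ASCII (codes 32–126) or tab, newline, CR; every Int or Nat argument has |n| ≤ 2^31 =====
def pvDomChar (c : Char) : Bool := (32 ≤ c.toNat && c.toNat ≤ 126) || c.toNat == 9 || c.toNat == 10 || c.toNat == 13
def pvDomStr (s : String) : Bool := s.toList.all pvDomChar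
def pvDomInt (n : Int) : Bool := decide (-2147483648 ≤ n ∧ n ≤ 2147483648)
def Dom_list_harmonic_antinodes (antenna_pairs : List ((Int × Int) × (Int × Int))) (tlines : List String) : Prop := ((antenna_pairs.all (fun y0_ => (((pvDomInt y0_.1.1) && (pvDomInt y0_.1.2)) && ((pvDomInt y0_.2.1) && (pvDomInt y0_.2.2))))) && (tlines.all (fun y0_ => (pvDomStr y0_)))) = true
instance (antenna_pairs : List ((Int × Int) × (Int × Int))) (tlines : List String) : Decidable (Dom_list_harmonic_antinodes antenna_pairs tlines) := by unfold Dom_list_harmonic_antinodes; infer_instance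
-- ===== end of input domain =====

-- B replaces A's step-and-test while-loop along each ray by a closed-form maximal
-- multiplier (one floor division per moving axis) and emits the whole ray with one
-- range; objective 'alternative' (same asymptotic cost, different per-ray algorithm).

-- ===== PORT A =====

def pvWithinBounds (x y width height : Int) : Bool :=
  if x < 0 || width ≤ x then false
  else decide (0 ≤ y) && decide (y < height)

-- A's while-loop, ported with fuel; width.toNat + height.toNat + 1 steps suffice on
-- every input where the Python loop terminates (nonterminating inputs are outside Pre_).
def pvHLoop (fuel : Nat) (ix iy dx dy width height : Int) : List (Int × Int) :=
  match fuel with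
  | 0 => []
  | n + 1 =>
    if pvWithinBounds ix iy width height then
      (ix, iy) :: pvHLoop n (ix + dx) (iy + dy) dx dy width height
    else []

def pvCalcHAntinodes (a b : Int × Int) (width height : Int) : List (Int × Int) :=
  pvHLoop (width.toNat + height.toNat + 1) b.1 b.2 (b.1 - a.1) (b.2 - a.2) width height

def list_harmonic_antinodes (antenna_pairs : List ((Int × Int) × (Int × Int))) (tlines : List String) : List (Int × Int) :=
  let height : Int := PySem.List.len tlines
  let width : Int := PySem.Str.len (PySem.List.pyGetD tlines 0 "")  -- tlines[0]; IndexError on [] excluded by Pre_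
  antenna_pairs.foldl
    (fun antinodes p =>
      let antinodes := PySem.Set.union antinodes (pvCalcHAntinodes p.1 p.2 width height)
      PySem.Set.union antinodes (pvCalcHAntinodes p.2 p.1 width height))
    PySem.Set.empty

-- ===== PORT B =====

-- _axis_lims from Source B
def pvAxisLims (p d lo : Int) : List Int :=
  if 0 < d then [PySem.Int.floordiv (lo - 1 - p) d]
  else if d < 0 then [PySem.Int.floordiv p (-d)] else []

-- _ray from Source B
def pvRay (x y dx dy width height : Int) : List (Int × Int) :=
  if ¬ (0 ≤ x ∧ x < width ∧ 0 ≤ y ∧ y < height) then []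
  else
    let lims : List Int := pvAxisLims x dx width ++ pvAxisLims y dy height
    let imax : Int :=
      match PySem.List.min? lims (fun v => v) with
      | some m => m
      | none => 0
    (PySem.List.pyRange 0 (imax + 1) 1).map (fun i => (x + i * dx, y + i * dy))

def list_harmonic_antinodes_alt (antenna_pairs : List ((Int × Int) × (Int × Int))) (tlines : List String) : List (Int × Int) :=
  let height : Int := PySem.List.len tlines
  let width : Int := PySem.Str.len (PySem.List.pyGetD tlines 0 "")
  antenna_pairs.foldl
    (fun s p =>
      let s := PySem.Set.update s (pvRay p.2.1 p.2.2 (p.2.1 - p.1.1) (p.2.2 - p.1.2) width height)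
      PySem.Set.update s (pvRay p.1.1 p.1.2 (p.1.1 - p.2.1) (p.1.2 - p.2.2) width height))
    PySem.Set.empty

-- ===== PRECONDITION & SPEC =====
-- Pre_ excludes the empty grid (tlines = [], where A raises IndexError on tlines[0]) and
-- pairs whose two antennas coincide on an in-bounds cell (zero delta, where A's while-loop
-- never terminates); A returns no value on any excluded input.
def Pre_list_harmonic_antinodes (antenna_pairs : List ((Int × Int) × (Int × Int))) (tlines : List String) : Prop :=
  tlines ≠ [] ∧ ∀ p ∈ antenna_pairs, p.1 = p.2 →
    ¬ (0 ≤ p.2.1 ∧ p.2.1 < PySem.Str.len (PySem.List.pyGetD tlines 0 "") ∧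
       0 ≤ p.2.2 ∧ p.2.2 < (tlines.length : Int))
instance (antenna_pairs : List ((Int × Int) × (Int × Int))) (tlines : List String) : Decidable (Pre_list_harmonic_antinodes antenna_pairs tlines) := by unfold Pre_list_harmonic_antinodes; infer_instance

def pvWitness_list_harmonic_antinodes : (List ((Int × Int) × (Int × Int))) × List String :=
  ([((0, 0), (1, 1))], ["ab", "cd"])

def Spec_list_harmonic_antinodes (antenna_pairs : List ((Int × Int) × (Int × Int))) (tlines : List String) (out : List (Int × Int)) : Prop := out = list_harmonic_antinodes_alt antenna_pairs tlines
instance (antenna_pairs : List ((Int × Int) × (Int × Int))) (tlines : List String) (out : List (Int × Int)) : Decidable (Spec_list_harmonic_antinodes antenna_pairs tlines out) := by unfold Spec_list_harmonic_antinodes; infer_instance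

-- ===== CLAIM (what is proved, stated in full; the proofs are below) =====
def Claim_equal_list_harmonic_antinodes : Prop := ∀ (antenna_pairs : List ((Int × Int) × (Int × Int))) (tlines : List String), Dom_list_harmonic_antinodes antenna_pairs tlines → Pre_list_harmonic_antinodes antenna_pairs tlines → Spec_list_harmonic_antinodes antenna_pairs tlines (list_harmonic_antinodes antenna_pairs tlines)

-- ===== LEMMAS AND PROOFS =====

theorem pvWithin_iff (x y w h : Int) :
    pvWithinBounds x y w h = true ↔ (0 ≤ x ∧ x < w ∧ 0 ≤ y ∧ y < h) := by
  simp only [pvWithinBounds]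
  split <;> simp_all <;> omega

theorem pvHLoop_nil (fuel : Nat) (x y dx dy w h : Int)
    (hf : pvWithinBounds x y w h = false) : pvHLoop fuel x y dx dy w h = [] := by
  cases fuel <;> simp [pvHLoop, hf]

theorem pvHLoop_run : ∀ (k fuel : Nat) (x y dx dy w h : Int), k < fuel →
    (∀ i : Nat, i ≤ k → pvWithinBounds (x + i * dx) (y + i * dy) w h = true) →
    pvWithinBounds (x + (k + 1 : Nat) * dx) (y + (k + 1 : Nat) * dy) w h = false →
    pvHLoop fuel x y dx dy w h = (List.range (k + 1)).map (fun i : Nat => (x + (i : Int) * dx, y + (i : Int) * dy)) := by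
  intro k
  induction k with
  | zero =>
    intro fuel x y dx dy w h hf h1 h2
    match fuel, hf with
    | n + 1, _ =>
      have h0 := h1 0 (le_refl 0)
      simp only [Nat.cast_zero, zero_mul, add_zero] at h0
      have h2' : pvWithinBounds (x + dx) (y + dy) w h = false := by
        simpa using h2
      simp [pvHLoop, h0, pvHLoop_nil _ _ _ _ _ _ _ h2', List.range_succ]
  | succ k ih =>
    intro fuel x y dx dy w h hf h1 h2
    match fuel, hf with
    | n + 1, hf =>
      have h0 := h1 0 (Nat.zero_le _)
      simp only [Nat.cast_zero, zero_mul, add_zero] at h0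
      have ihh := ih n (x + dx) (y + dy) dx dy w h (by omega)
        (fun i hi => by
          have e1 : x + dx + (i : Int) * dx = x + ((i + 1 : Nat) : Int) * dx := by push_cast; ring
          have e2 : y + dy + (i : Int) * dy = y + ((i + 1 : Nat) : Int) * dy := by push_cast; ring
          rw [e1, e2]; exact h1 (i + 1) (by omega))
        (by
          have e1 : x + dx + ((k + 1 : Nat) : Int) * dx = x + ((k + 1 + 1 : Nat) : Int) * dx := by push_cast; ring
          have e2 : y + dy + ((k + 1 : Nat) : Int) * dy = y + ((k + 1 + 1 : Nat) : Int) * dy := by push_cast; ring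
          rw [e1, e2]; exact h2)
      simp only [pvHLoop, h0, if_true, ihh]
      rw [show List.range (k + 1 + 1) = 0 :: List.map Nat.succ (List.range (k + 1)) from
        List.range_succ_eq_map (n := k + 1), List.map_cons, List.map_map]
      congr 1
      · norm_num
      apply List.map_congr_left
      intro i _
      simp only [Function.comp_apply, Nat.succ_eq_add_one, Prod.mk.injEq]
      constructor
      · push_cast; ring
      · push_cast; ring

theorem pv_le_floordiv_nonneg {a b : Int} (ha : 0 ≤ a) (hb : 0 < b) :
    0 ≤ PySem.Int.floordiv a b := by
  rw [PySem.Int.le_floordiv_iff_mul_le hb]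
  simpa using ha

theorem pv_floordiv_le_num {a b : Int} (ha : 0 ≤ a) (hb : 0 < b) :
    PySem.Int.floordiv a b ≤ a := by
  rw [PySem.Int.floordiv_eq_ediv_of_pos hb]
  exact Int.ediv_le_self b ha

theorem pv_axis_pos {d x w i : Int} (hd : 0 < d) (hx0 : 0 ≤ x) (hxw : x < w) (hi : 0 ≤ i) :
    (0 ≤ x + i * d ∧ x + i * d < w) ↔ i ≤ PySem.Int.floordiv (w - 1 - x) d := by
  rw [PySem.Int.le_floordiv_iff_mul_le hd]
  have hnn : 0 ≤ i * d := mul_nonneg hi hd.le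
  omega

theorem pv_axis_neg {d x w i : Int} (hd : d < 0) (hx0 : 0 ≤ x) (hxw : x < w) (hi : 0 ≤ i) :
    (0 ≤ x + i * d ∧ x + i * d < w) ↔ i ≤ PySem.Int.floordiv x (-d) := by
  rw [PySem.Int.le_floordiv_iff_mul_le (by omega : (0:Int) < -d)]
  have h1 : i * d ≤ 0 := mul_nonpos_of_nonneg_of_nonpos hi hd.le
  have h2 : i * -d = -(i * d) := by ring
  omega

theorem pvAxisLims_iff {p d lo : Int} (hp0 : 0 ≤ p) (hplo : p < lo) {i : Int} (hi : 0 ≤ i) :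
    (0 ≤ p + i * d ∧ p + i * d < lo) ↔ ∀ l ∈ pvAxisLims p d lo, i ≤ l := by
  unfold pvAxisLims
  rcases lt_trichotomy d 0 with hd | hd | hd
  · rw [if_neg (by omega), if_pos hd]
    simpa using pv_axis_neg hd hp0 hplo hi
  · subst hd
    simp only [lt_irrefl, if_false]
    simp
    omega
  · rw [if_pos hd]
    simpa using pv_axis_pos hd hp0 hplo hi

theorem pvAxisLims_bounds {p d lo : Int} (hp0 : 0 ≤ p) (hplo : p < lo) :
    ∀ l ∈ pvAxisLims p d lo, 0 ≤ l ∧ l ≤ lo - 1 := by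
  unfold pvAxisLims
  rcases lt_trichotomy d 0 with hd | hd | hd
  · rw [if_neg (by omega), if_pos hd]
    intro l hl
    simp only [List.mem_singleton] at hl
    subst hl
    refine ⟨pv_le_floordiv_nonneg hp0 (by omega), ?_⟩
    have := pv_floordiv_le_num hp0 (by omega : (0:Int) < -d)
    omega
  · subst hd; simp
  · rw [if_pos hd]
    intro l hl
    simp only [List.mem_singleton] at hl
    subst hl
    refine ⟨pv_le_floordiv_nonneg (by omega) hd, ?_⟩
    have := pv_floordiv_le_num (by omega : (0:Int) ≤ lo - 1 - p) hd
    omega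

theorem pvAxisLims_ne_nil {p d lo : Int} (hd : d ≠ 0) : pvAxisLims p d lo ≠ [] := by
  unfold pvAxisLims
  rcases lt_trichotomy d 0 with h | h | h
  · simp [show ¬ (0:Int) < d by omega, h]
  · exact absurd h hd
  · simp [h]

-- the heart of the claim: A's stepped ray equals B's closed-form ray
theorem pvRay_eq_calc (a b : Int × Int) (w h : Int)
    (hpre : a = b → ¬ (0 ≤ b.1 ∧ b.1 < w ∧ 0 ≤ b.2 ∧ b.2 < h)) :
    pvCalcHAntinodes a b w h = pvRay b.1 b.2 (b.1 - a.1) (b.2 - a.2) w h := by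
  set x := b.1 with hxdef
  set y := b.2 with hydef
  set dx := b.1 - a.1 with hdx
  set dy := b.2 - a.2 with hdy
  by_cases hin : (0 ≤ x ∧ x < w ∧ 0 ≤ y ∧ y < h)
  · -- start in bounds; the deltas are not both zero
    have hin' := hin
    have hdne : ¬ (dx = 0 ∧ dy = 0) := by
      rintro ⟨h1, h2⟩
      exact hpre (Prod.ext (by omega) (by omega)) hin
    obtain ⟨hx0, hxw, hy0, hyh⟩ := hin
    have hlims_ne : pvAxisLims x dx w ++ pvAxisLims y dy h ≠ [] := by
      rcases Decidable.em (dx = 0) with h1 | h1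
      · have h2 : dy ≠ 0 := fun h2 => hdne ⟨h1, h2⟩
        simp [pvAxisLims_ne_nil h2]
      · simp [pvAxisLims_ne_nil h1]
    obtain ⟨m, hm⟩ : ∃ m, PySem.List.min? (pvAxisLims x dx w ++ pvAxisLims y dy h) (fun v => v) = some m := by
      rcases hl : pvAxisLims x dx w ++ pvAxisLims y dy h with _ | ⟨c, t⟩
      · exact absurd hl hlims_ne
      · exact ⟨t.foldl min c, PySem.List.min?_id_cons c t⟩
    have hm_mem : m ∈ pvAxisLims x dx w ++ pvAxisLims y dy h := PySem.List.min?_mem hm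
    have hm_min : ∀ l ∈ pvAxisLims x dx w ++ pvAxisLims y dy h, m ≤ l := by
      intro l hl; exact PySem.List.min?_isMin hm l hl
    have hm0 : 0 ≤ m := by
      rcases List.mem_append.mp hm_mem with hmx | hmy
      · exact (pvAxisLims_bounds hx0 hxw m hmx).1
      · exact (pvAxisLims_bounds hy0 hyh m hmy).1
    have hm_lt : m < w ∨ m < h := by
      rcases List.mem_append.mp hm_mem with hmx | hmy
      · exact Or.inl (by have := (pvAxisLims_bounds hx0 hxw m hmx).2; omega)
      · exact Or.inr (by have := (pvAxisLims_bounds hy0 hyh m hmy).2; omega)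
    have hiff : ∀ i : Int, 0 ≤ i →
        (pvWithinBounds (x + i * dx) (y + i * dy) w h = true ↔ i ≤ m) := by
      intro i hi
      rw [pvWithin_iff]
      constructor
      · rintro ⟨c1, c2, c3, c4⟩
        have hax := (pvAxisLims_iff hx0 hxw hi).mp ⟨c1, c2⟩
        have hay := (pvAxisLims_iff hy0 hyh hi).mp ⟨c3, c4⟩
        rcases List.mem_append.mp hm_mem with hmx | hmy
        · exact hax m hmx
        · exact hay m hmy
      · intro him
        have hax := (pvAxisLims_iff hx0 hxw hi).mpr
          (fun l hl => le_trans him (hm_min l (List.mem_append.mpr (Or.inl hl))))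
        have hay := (pvAxisLims_iff hy0 hyh hi).mpr
          (fun l hl => le_trans him (hm_min l (List.mem_append.mpr (Or.inr hl))))
        exact ⟨hax.1, hax.2, hay.1, hay.2⟩
    have hrun := pvHLoop_run m.toNat (w.toNat + h.toNat + 1) x y dx dy w h
      (by omega)
      (fun i hi => (hiff i (by omega)).mpr (by omega))
      (by
        rw [Bool.eq_false_iff]
        intro hc
        have := (hiff (((m.toNat + 1 : Nat) : Int)) (by omega)).mp hc
        omega)
    show pvHLoop (w.toNat + h.toNat + 1) x y dx dy w h = pvRay x y dx dy w h
    rw [hrun]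
    unfold pvRay
    rw [if_neg (not_not_intro hin')]
    simp only [hm]
    rw [PySem.List.pyRange_one]
    have hcnt : (m + 1 - 0).toNat = m.toNat + 1 := by omega
    rw [hcnt, List.map_map]
    apply List.map_congr_left
    intro i _
    simp [Function.comp]
  · -- start out of bounds: both sides are empty
    have hfalse : pvWithinBounds x y w h = false := by
      have : pvWithinBounds x y w h ≠ true := fun hc => hin ((pvWithin_iff _ _ _ _).mp hc)
      simpa using this
    show pvHLoop (w.toNat + h.toNat + 1) x y dx dy w h = pvRay x y dx dy w h
    rw [pvHLoop_nil _ _ _ _ _ _ _ hfalse]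
    unfold pvRay
    rw [if_pos hin]

theorem pv_foldl_congr_mem {α β : Type} (l : List α) (f g : β → α → β) :
    (∀ p ∈ l, ∀ s, f s p = g s p) → ∀ s, l.foldl f s = l.foldl g s := by
  induction l with
  | nil => intro _ s; rfl
  | cons x t ih =>
    intro hfg s
    simp only [List.foldl_cons]
    rw [hfg x List.mem_cons_self s]
    exact ih (fun p hp s' => hfg p (List.mem_cons_of_mem _ hp) s') _

-- ===== VERDICT (by name: the statement is the Claim_ definition above) =====
theorem list_harmonic_antinodes_spec : Claim_equal_list_harmonic_antinodes := by
  intro ap tlines _hdom hpre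
  unfold Spec_list_harmonic_antinodes
  simp only [list_harmonic_antinodes, list_harmonic_antinodes_alt]
  apply pv_foldl_congr_mem
  intro p hp s
  have hlen : PySem.List.len tlines = (tlines.length : Int) := by simp
  have hc1 : p.1 = p.2 →
      ¬ (0 ≤ p.2.1 ∧ p.2.1 < PySem.Str.len (PySem.List.pyGetD tlines 0 "") ∧
         0 ≤ p.2.2 ∧ p.2.2 < PySem.List.len tlines) := by
    intro heq hb
    exact hpre.2 p hp heq (by rw [← hlen]; exact hb)
  have hc2 : p.2 = p.1 →
      ¬ (0 ≤ p.1.1 ∧ p.1.1 < PySem.Str.len (PySem.List.pyGetD tlines 0 "") ∧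
         0 ≤ p.1.2 ∧ p.1.2 < PySem.List.len tlines) := by
    intro heq hb
    exact hc1 heq.symm (by rw [heq]; exact hb)
  rw [pvRay_eq_calc p.1 p.2 _ _ hc1, pvRay_eq_calc p.2 p.1 _ _ hc2]
  rfl
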